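-- pv_equiv track=rewrite | github.com/theguydie/interval-analysis | laba 1/intervalka1.py | IntMult
-- ===== SOURCE A (Python) =====
-- def IntMult(a, b):
--     res_min = a[0]*b[0]
--     res_max = a[0]*b[0]
--
--     # remember indeces of elems in result multiply (MIN = 0/MAX = 1)
--     indeces = [[0, 0], [0, 0]]
--
--     for i in range(2):
--         for j in range(2):
--             if a[i]*b[j] < res_min:
--                 res_min = a[i]*b[j]
--                 indeces[0] = [i, j]
--             if a[i]*b[j] > res_max:
--                 res_max = a[i]*b[j]
--                 indeces[1] = [i, j]
--
--     return [res_min, res_max], indeces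
-- ===== SOURCE B (Python) =====
-- def IntMult(a, b):
--     # sort-then-pick: stable sorts put the earliest (row-major) extremal pair first
--     pairs = [(a[i] * b[j], [i, j]) for i in range(2) for j in range(2)]
--     asc = sorted(pairs, key=lambda p: p[0])
--     desc = sorted(pairs, key=lambda p: p[0], reverse=True)
--     return [asc[0][0], desc[0][0]], [asc[0][1], desc[0][1]]
-- ===== Notes on version B (the rewrite author's own statement) =====
-- stated objective: alternative
-- what changed: A maintains four running state variables (min, max and two index slots) updated by conditionals inside a nested 2x2 loop; B builds the four (product, [i,j]) pairs and instead sorts them stably twice (ascending and descending by value), taking the head of each sort as the first-occurrence min and max.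
import Mathlib
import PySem

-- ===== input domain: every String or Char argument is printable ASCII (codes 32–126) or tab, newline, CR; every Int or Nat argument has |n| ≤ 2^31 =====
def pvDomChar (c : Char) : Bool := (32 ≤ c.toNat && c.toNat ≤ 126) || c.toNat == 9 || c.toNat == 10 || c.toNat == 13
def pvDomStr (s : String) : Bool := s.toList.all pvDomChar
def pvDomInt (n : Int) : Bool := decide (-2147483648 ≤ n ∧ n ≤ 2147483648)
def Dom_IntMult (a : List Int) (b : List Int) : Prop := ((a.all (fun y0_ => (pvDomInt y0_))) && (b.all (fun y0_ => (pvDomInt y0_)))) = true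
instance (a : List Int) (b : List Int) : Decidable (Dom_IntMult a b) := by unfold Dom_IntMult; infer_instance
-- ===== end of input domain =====

-- B replaces A's running-extremum update loop by sort-then-pick: two stable sorts of the
-- four (product, [i,j]) pairs; the heads give the first-occurrence min and max — simpler decomposition.

-- ===== PORT A =====
-- a[i] of both Pythons; Pre_ guarantees the index is in range (out of range Python raises)
def pyGetD (xs : List Int) (i : Int) : Int := (PySem.List.pyGet? xs i).getD 0

-- the body of A's inner loop: the two running-extremum updates, in A's order
def IntMultStep (st : Int × Int × List Int × List Int) (p : Int) (ij : List Int) :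
    Int × Int × List Int × List Int :=
  let st := if p < st.1 then (p, st.2.1, ij, st.2.2.2) else st
  if st.2.1 < p then (st.1, p, st.2.2.1, ij) else st

def IntMult (a : List Int) (b : List Int) : List Int × List (List Int) :=
  let init : Int × Int × List Int × List Int :=
    (pyGetD a 0 * pyGetD b 0, pyGetD a 0 * pyGetD b 0, [0, 0], [0, 0])
  let st := (PySem.List.pyRange 0 2 1).foldl (fun st i =>
    (PySem.List.pyRange 0 2 1).foldl (fun st j =>
      IntMultStep st (pyGetD a i * pyGetD b j) [i, j]) st) init
  ([st.1, st.2.1], [st.2.2.1, st.2.2.2])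

-- ===== PORT B =====
def IntMult_alt (a : List Int) (b : List Int) : List Int × List (List Int) :=
  let pairs : List (Int × List Int) := (PySem.List.pyRange 0 2 1).flatMap (fun i =>
    (PySem.List.pyRange 0 2 1).map (fun j => (pyGetD a i * pyGetD b j, ([i, j] : List Int))))
  let asc := PySem.List.sorted pairs (fun p => p.1) false
  let desc := PySem.List.sorted pairs (fun p => p.1) true
  match asc, desc with
  | pa :: _, pd :: _ => ([pa.1, pd.1], [pa.2, pd.2])
  | _, _ => ([], [])  -- unreachable: pairs always has four elements

-- ===== PRECONDITION & SPEC =====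
-- Pre_ excludes exactly the inputs on which Python A raises IndexError: a list shorter than 2.
def Pre_IntMult (a : List Int) (b : List Int) : Prop := 2 ≤ a.length ∧ 2 ≤ b.length
instance (a : List Int) (b : List Int) : Decidable (Pre_IntMult a b) := by unfold Pre_IntMult; infer_instance
def pvWitness_IntMult : List Int × List Int := ([2, -3], [5, 7])

def Spec_IntMult (a : List Int) (b : List Int) (out : List Int × List (List Int)) : Prop := out = IntMult_alt a b
instance (a : List Int) (b : List Int) (out : List Int × List (List Int)) : Decidable (Spec_IntMult a b out) := by unfold Spec_IntMult; infer_instance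

-- ===== CLAIM (what is proved, stated in full; the proofs are below) =====
def Claim_equal_IntMult : Prop := ∀ (a : List Int) (b : List Int), Dom_IntMult a b → Pre_IntMult a b → Spec_IntMult a b (IntMult a b)

-- ===== LEMMAS AND PROOFS =====

-- first-occurrence min/max update steps on (value, index) pairs
def mstep (m x : Int × List Int) : Int × List Int := if x.1 < m.1 then x else m
def Mstep (m x : Int × List Int) : Int × List Int := if m.1 < x.1 then x else m

-- one combined step of A splits into independent min and max steps
theorem step_split (m M : Int × List Int) (p : Int) (ij : List Int) :
    IntMultStep (m.1, M.1, m.2, M.2) p ij =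
      ((mstep m (p, ij)).1, (Mstep M (p, ij)).1, (mstep m (p, ij)).2, (Mstep M (p, ij)).2) := by
  unfold IntMultStep mstep Mstep
  by_cases h1 : p < m.1 <;> by_cases h2 : M.1 < p <;> simp [h1, h2]

theorem mstep_self (x : Int × List Int) : mstep x x = x := by
  unfold mstep; simp

theorem Mstep_self (x : Int × List Int) : Mstep x x = x := by
  unfold Mstep; simp

theorem pyRange02 : PySem.List.pyRange 0 2 1 = [0, 1] := by decide

-- inserting x into a nonempty list for the ascending sort: the new head is mstep h x
theorem insertBy_min_cons (x h : Int × List Int) (t : List (Int × List Int)) :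
    ∃ t', PySem.List.insertBy (fun p q => decide (p.1 < q.1)) x (h :: t) = mstep h x :: t' := by
  by_cases hx : x.1 < h.1
  · exact ⟨h :: t, by simp [PySem.List.insertBy, mstep, hx]⟩
  · exact ⟨PySem.List.insertBy (fun p q => decide (p.1 < q.1)) x t,
      by simp [PySem.List.insertBy, mstep, hx]⟩

-- inserting x into a nonempty list for the descending sort: the new head is Mstep h x
theorem insertBy_max_cons (x h : Int × List Int) (t : List (Int × List Int)) :
    ∃ t', PySem.List.insertBy (fun p q => decide (q.1 < p.1)) x (h :: t) = Mstep h x :: t' := by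
  by_cases hx : h.1 < x.1
  · exact ⟨h :: t, by simp [PySem.List.insertBy, Mstep, hx]⟩
  · exact ⟨PySem.List.insertBy (fun p q => decide (q.1 < p.1)) x t,
      by simp [PySem.List.insertBy, Mstep, hx]⟩

theorem insertBy_nil_min (x : Int × List Int) :
    PySem.List.insertBy (fun p q => decide (p.1 < q.1)) x [] = [x] := by
  simp [PySem.List.insertBy]

theorem insertBy_nil_max (x : Int × List Int) :
    PySem.List.insertBy (fun p q => decide (q.1 < p.1)) x [] = [x] := by
  simp [PySem.List.insertBy]

-- head of the ascending stable sort of a 4-list = the first-occurrence min fold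
theorem sorted_head_min (e0 e1 e2 e3 : Int × List Int) :
    ∃ t, PySem.List.sorted [e0, e1, e2, e3] (fun p => p.1) false
          = mstep (mstep (mstep e0 e1) e2) e3 :: t := by
  rw [PySem.List.sorted_eq_foldl_insertBy]
  simp only [List.foldl, insertBy_nil_min]
  obtain ⟨t1, h1⟩ := insertBy_min_cons e1 e0 []
  rw [h1]
  obtain ⟨t2, h2⟩ := insertBy_min_cons e2 (mstep e0 e1) t1
  rw [h2]
  exact insertBy_min_cons e3 (mstep (mstep e0 e1) e2) t2

-- head of the descending stable sort of a 4-list = the first-occurrence max fold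
theorem sorted_head_max (e0 e1 e2 e3 : Int × List Int) :
    ∃ t, PySem.List.sorted [e0, e1, e2, e3] (fun p => p.1) true
          = Mstep (Mstep (Mstep e0 e1) e2) e3 :: t := by
  rw [PySem.List.sorted_rev_eq_foldl_insertBy]
  simp only [List.foldl, insertBy_nil_max]
  obtain ⟨t1, h1⟩ := insertBy_max_cons e1 e0 []
  rw [h1]
  obtain ⟨t2, h2⟩ := insertBy_max_cons e2 (Mstep e0 e1) t1
  rw [h2]
  exact insertBy_max_cons e3 (Mstep (Mstep e0 e1) e2) t2

-- ===== VERDICT (by name: the statement is the Claim_ definition above) =====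
theorem IntMult_spec : Claim_equal_IntMult := by
  intro a b _hdom _hpre
  show IntMult a b = IntMult_alt a b
  simp only [IntMult, IntMult_alt, pyRange02, List.foldl, List.flatMap, List.map,
    List.flatten, List.append]
  set e0 : Int × List Int := (pyGetD a 0 * pyGetD b 0, [0, 0]) with he0
  set e1 : Int × List Int := (pyGetD a 0 * pyGetD b 1, [0, 1]) with he1
  set e2 : Int × List Int := (pyGetD a 1 * pyGetD b 0, [1, 0]) with he2
  set e3 : Int × List Int := (pyGetD a 1 * pyGetD b 1, [1, 1]) with he3
  have hinit : (pyGetD a 0 * pyGetD b 0, pyGetD a 0 * pyGetD b 0, ([0,0] : List Int), ([0,0] : List Int))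
      = (e0.1, e0.1, e0.2, e0.2) := rfl
  rw [hinit]
  rw [show IntMultStep (e0.1, e0.1, e0.2, e0.2) (pyGetD a 0 * pyGetD b 0) [0, 0]
        = ((mstep e0 e0).1, (Mstep e0 e0).1, (mstep e0 e0).2, (Mstep e0 e0).2) from step_split e0 e0 e0.1 e0.2]
  rw [mstep_self, Mstep_self]
  rw [show IntMultStep (e0.1, e0.1, e0.2, e0.2) (pyGetD a 0 * pyGetD b 1) [0, 1]
        = ((mstep e0 e1).1, (Mstep e0 e1).1, (mstep e0 e1).2, (Mstep e0 e1).2) from step_split e0 e0 e1.1 e1.2]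
  rw [show IntMultStep ((mstep e0 e1).1, (Mstep e0 e1).1, (mstep e0 e1).2, (Mstep e0 e1).2)
        (pyGetD a 1 * pyGetD b 0) [1, 0]
        = ((mstep (mstep e0 e1) e2).1, (Mstep (Mstep e0 e1) e2).1,
           (mstep (mstep e0 e1) e2).2, (Mstep (Mstep e0 e1) e2).2)
      from step_split (mstep e0 e1) (Mstep e0 e1) e2.1 e2.2]
  rw [show IntMultStep ((mstep (mstep e0 e1) e2).1, (Mstep (Mstep e0 e1) e2).1,
        (mstep (mstep e0 e1) e2).2, (Mstep (Mstep e0 e1) e2).2)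
        (pyGetD a 1 * pyGetD b 1) [1, 1]
        = ((mstep (mstep (mstep e0 e1) e2) e3).1, (Mstep (Mstep (Mstep e0 e1) e2) e3).1,
           (mstep (mstep (mstep e0 e1) e2) e3).2, (Mstep (Mstep (Mstep e0 e1) e2) e3).2)
      from step_split (mstep (mstep e0 e1) e2) (Mstep (Mstep e0 e1) e2) e3.1 e3.2]
  obtain ⟨tm, hm⟩ := sorted_head_min e0 e1 e2 e3
  obtain ⟨tM, hM⟩ := sorted_head_max e0 e1 e2 e3
  rw [hm, hM]
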